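-- pv_equiv track=rewrite | github.com/DalgoT4D/feedback_app | services/db_helper.py | get_manager_level_from_designation
-- ===== SOURCE A (Python) =====
-- def get_manager_level_from_designation(designation):
--     """Determine manager level from designation"""
--     if not designation:
--         return 0
--
--     designation = designation.lower()
--
--     if any(term in designation for term in ['director', 'head']):
--         return 3
--     elif any(term in designation for term in ['senior manager', 'senior mgr']):
--         return 2
--     elif any(term in designation for term in ['manager', 'mgr', 'team lead', 'team leader']):
--         return 1
--     else:
--         return 0
-- ===== SOURCE B (Python) =====
-- _LEVELS = [
--     ('director', 3), ('head', 3),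
--     ('senior manager', 2), ('senior mgr', 2),
--     ('manager', 1), ('mgr', 1), ('team lead', 1), ('team leader', 1),
-- ]
--
--
-- def get_manager_level_from_designation(designation):
--     """Determine manager level from designation"""
--     if not designation:
--         return 0
--     d = designation.lower()
--     return max((lvl for term, lvl in _LEVELS if term in d), default=0)
-- ===== Notes on version B (the rewrite author's own statement) =====
-- stated objective: simpler
-- what changed: Replaces the three-branch priority cascade of any(...) scans with a single flat term-to-level table scanned once, returning the maximum matched level (default 0); correct because A's groups are level-descending, so first-match equals max.
import Mathlib
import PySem

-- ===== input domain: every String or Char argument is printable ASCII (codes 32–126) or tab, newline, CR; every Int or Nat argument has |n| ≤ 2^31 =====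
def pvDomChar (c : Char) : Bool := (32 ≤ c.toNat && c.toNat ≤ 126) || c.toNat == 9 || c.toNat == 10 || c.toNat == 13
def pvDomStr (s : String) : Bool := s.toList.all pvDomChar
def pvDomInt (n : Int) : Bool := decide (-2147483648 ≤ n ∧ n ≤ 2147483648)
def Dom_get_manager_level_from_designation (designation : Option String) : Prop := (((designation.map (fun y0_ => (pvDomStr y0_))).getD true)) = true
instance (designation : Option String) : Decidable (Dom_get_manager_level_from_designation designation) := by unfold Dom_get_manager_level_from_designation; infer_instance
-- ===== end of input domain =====

-- B replaces A's three-branch priority cascade with one flat term→level table and a max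
-- over matched levels (objective: simpler); return values agree on all inputs.

-- ===== PORT A =====
def get_manager_level_from_designation (designation : Option String) : Int :=
  match designation with
  | none => 0
  | some s =>
    if s = "" then 0
    else
      let d := PySem.Str.lower s
      if [("director" : String), "head"].any (fun term => PySem.Str.isIn term d) then 3
      else if [("senior manager" : String), "senior mgr"].any (fun term => PySem.Str.isIn term d) then 2
      else if [("manager" : String), "mgr", "team lead", "team leader"].any (fun term => PySem.Str.isIn term d) then 1
      else 0

-- ===== PORT B =====
def pvLevels : List (String × Int) :=
  [("director", 3), ("head", 3),
   ("senior manager", 2), ("senior mgr", 2),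
   ("manager", 1), ("mgr", 1), ("team lead", 1), ("team leader", 1)]

def get_manager_level_from_designation_alt (designation : Option String) : Int :=
  match designation with
  | none => 0
  | some s =>
    if s = "" then 0
    else
      let d := PySem.Str.lower s
      PySem.List.maxD ((pvLevels.filter (fun p => PySem.Str.isIn p.1 d)).map (fun p => p.2)) id 0

-- ===== PRECONDITION & SPEC =====
def Spec_get_manager_level_from_designation (designation : Option String) (out : Int) : Prop := out = get_manager_level_from_designation_alt designation
instance (designation : Option String) (out : Int) : Decidable (Spec_get_manager_level_from_designation designation out) := by unfold Spec_get_manager_level_from_designation; infer_instance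

-- ===== CLAIM (what is proved, stated in full; the proofs are below) =====
def Claim_equal_get_manager_level_from_designation : Prop := ∀ (designation : Option String), Dom_get_manager_level_from_designation designation → Spec_get_manager_level_from_designation designation (get_manager_level_from_designation designation)
-- ===== LEMMAS AND PROOFS =====
def pvCascade (b1 b2 b3 b4 b5 b6 b7 b8 : Bool) : Int :=
  if b1 || (b2 || false) then 3
  else if b3 || (b4 || false) then 2
  else if b5 || (b6 || (b7 || (b8 || false))) then 1
  else 0

def pvMax (b1 b2 b3 b4 b5 b6 b7 b8 : Bool) : Int :=
  PySem.List.maxD (((([(b1,(3:Int)),(b2,3),(b3,2),(b4,2),(b5,1),(b6,1),(b7,1),(b8,1)] : List (Bool × Int)).filter (fun p => p.1)).map (fun p => p.2))) id 0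

-- A's cascade and B's max agree as functions of the eight match bits (valid because A's
-- branch groups carry strictly descending levels).
theorem pv_key : ∀ b1 b2 b3 b4 b5 b6 b7 b8 : Bool, pvCascade b1 b2 b3 b4 b5 b6 b7 b8 = pvMax b1 b2 b3 b4 b5 b6 b7 b8 := by decide

theorem pv_tag {α β : Type} (f : α → Bool) (g : α → β) (l : List α) :
    (l.filter f).map g = ((l.map fun a => (f a, g a)).filter (fun p => p.1)).map (fun p => p.2) := by
  induction l with
  | nil => rfl
  | cons a t ih => by_cases h : f a = true <;> simp [h, ih]

theorem pv_some_case (s : String) (hs : ¬ s = "") :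
    get_manager_level_from_designation (some s) = get_manager_level_from_designation_alt (some s) := by
  simp only [get_manager_level_from_designation, get_manager_level_from_designation_alt, if_neg hs,
    List.any_cons, List.any_nil]
  rw [pv_tag]
  exact pv_key _ _ _ _ _ _ _ _

-- ===== VERDICT (by name: the statement is the Claim_ definition above) =====
theorem get_manager_level_from_designation_spec : Claim_equal_get_manager_level_from_designation := by
  intro designation _
  unfold Spec_get_manager_level_from_designation
  cases designation with
  | none => rfl
  | some s =>
    by_cases hs : s = ""
    · simp [get_manager_level_from_designation, get_manager_level_from_designation_alt, hs]
    · exact pv_some_case s hs
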